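-- pv_equiv track=rewrite | github.com/Alvaropz/Python_problems_BinarySearch | 2. Medium/fibonacci_subset_sum/fibonacci_subset_sum.py | fibonacci_subset_sum
-- ===== SOURCE A (Python) =====
-- def fibonacci_subset_sum(n):
--     fibo = [1, 1]
--     for number in range(n):
--         sum_fibo = fibo[-1] + fibo[-2]
--         if sum_fibo > n:
--             break
--         fibo.append(sum_fibo)
--     c_sum = 0
--     total = 0
--     for number in fibo[::-1]:
--         if c_sum + number < n:
--             c_sum += number
--             total += 1
--         if c_sum + number == n:
--             return total + 1
-- ===== SOURCE B (Python) =====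
-- def fibonacci_subset_sum(n):
--     if n <= 0:
--         return None
--     remaining = n
--     count = 0
--     while remaining > 0:
--         # fresh ascent: find the largest Fibonacci number <= remaining
--         a, b = 1, 1
--         while b <= remaining:
--             a, b = b, a + b
--         remaining -= a
--         count += 1
--     return count
-- ===== Notes on version B (the rewrite author's own statement) =====
-- stated objective: alternative
-- what changed: Instead of prebuilding the Fibonacci list up to n and making one reverse greedy pass over it, B keeps only a remaining counter and re-derives the largest Fibonacci number <= remaining by a fresh inner ascent on each outer step (repeated-scan greedy, no list at all).
import Mathlib
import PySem

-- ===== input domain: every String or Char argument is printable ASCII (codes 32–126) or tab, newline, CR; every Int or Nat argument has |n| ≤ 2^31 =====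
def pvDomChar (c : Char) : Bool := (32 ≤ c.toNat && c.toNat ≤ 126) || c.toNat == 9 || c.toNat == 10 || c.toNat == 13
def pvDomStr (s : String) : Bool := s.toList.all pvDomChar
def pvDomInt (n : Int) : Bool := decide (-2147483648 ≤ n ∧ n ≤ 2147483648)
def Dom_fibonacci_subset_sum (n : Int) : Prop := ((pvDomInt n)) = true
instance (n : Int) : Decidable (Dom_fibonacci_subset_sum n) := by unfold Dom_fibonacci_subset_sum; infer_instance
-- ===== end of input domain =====

-- B replaces A's build-the-Fibonacci-list-then-one-reverse-greedy-pass by a listless greedy loop that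
-- re-derives the largest Fibonacci number ≤ remaining with a fresh inner ascent at each step (alternative, not faster).

-- ===== PORT A =====
-- 'for number in range(n): … break' over the range list; fibo[-1]/fibo[-2] via pyGet?;
-- the .getD 0 is exact: fibo starts as [1,1] and only grows, so indices -1/-2 never raise.
def pvBuildA (n : Int) : List Int → List Int → List Int
  | [], fibo => fibo
  | _ :: rest, fibo =>
      let sum_fibo := (PySem.List.pyGet? fibo (-1)).getD 0 + (PySem.List.pyGet? fibo (-2)).getD 0
      if sum_fibo > n then fibo
      else pvBuildA n rest (fibo ++ [sum_fibo])

-- the second for-loop with its two ifs and early return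
def pvGreedyA (n : Int) : List Int → Int → Int → Option Int
  | [], _, _ => none
  | number :: rest, c_sum, total =>
      let c_sum' := if c_sum + number < n then c_sum + number else c_sum
      let total' := if c_sum + number < n then total + 1 else total
      if c_sum' + number = n then some (total' + 1)
      else pvGreedyA n rest c_sum' total'

def fibonacci_subset_sum (n : Int) : Option Int :=
  let fibo := pvBuildA n (PySem.List.pyRange 0 n 1) [1, 1]
  -- fibo[::-1]: slice? with step -1 ≠ 0 always returns some, so .getD [] is exact
  pvGreedyA n ((PySem.List.slice? fibo none none (-1)).getD []) 0 0

-- ===== PORT B =====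
-- inner ascent 'a, b = 1, 1; while b <= remaining: a, b = b, a + b'; fuel (remaining+1).toNat is a
-- totality guard only: b grows by at least 1 per step, so the fuel is never exhausted
def pvAscend : ℕ → Int → Int → Int → Int
  | 0, _, a, _ => a
  | fuel + 1, r, a, b => if b ≤ r then pvAscend fuel r b (a + b) else a

lemma pvAscend_pos : ∀ (fuel : ℕ) (r a b : Int), 1 ≤ a → 1 ≤ b → 1 ≤ pvAscend fuel r a b := by
  intro fuel
  induction fuel with
  | zero => intro r a b ha hb; exact ha
  | succ fuel ih =>
      intro r a b ha hb
      rw [pvAscend]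
      split_ifs with h
      · exact ih r b (a + b) hb (by omega)
      · exact ha

-- outer 'while remaining > 0' loop
def pvOuter (remaining count : Int) : Int :=
  if h : 0 < remaining then
    pvOuter (remaining - pvAscend (remaining + 1).toNat remaining 1 1) (count + 1)
  else count
termination_by remaining.toNat
decreasing_by
  have h1 := pvAscend_pos (remaining + 1).toNat remaining 1 1 (by omega) (by omega)
  omega

def fibonacci_subset_sum_alt (n : Int) : Option Int :=
  if n ≤ 0 then none else some (pvOuter n 0)

-- ===== PRECONDITION & SPEC =====
def Spec_fibonacci_subset_sum (n : Int) (out : Option Int) : Prop := out = fibonacci_subset_sum_alt n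
instance (n : Int) (out : Option Int) : Decidable (Spec_fibonacci_subset_sum n out) := by unfold Spec_fibonacci_subset_sum; infer_instance

-- ===== CLAIM (what is proved, stated in full; the proofs are below) =====
def Claim_equal_fibonacci_subset_sum : Prop := ∀ (n : Int), Dom_fibonacci_subset_sum n → Spec_fibonacci_subset_sum n (fibonacci_subset_sum n)

-- ===== LEMMAS AND PROOFS =====

-- the Fibonacci prefix [fib 1, …, fib k]
def pvFibs (k : ℕ) : List Int := (List.range k).map (fun j => ((Nat.fib (j + 1) : ℕ) : Int))

lemma pvFibs_succ (k : ℕ) : pvFibs (k + 1) = pvFibs k ++ [((Nat.fib (k + 1) : ℕ) : Int)] := by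
  simp [pvFibs, List.range_succ]

lemma pvFibs_two : pvFibs 2 = [1, 1] := by decide

lemma pvFibs_length (k : ℕ) : (pvFibs k).length = k := by simp [pvFibs]

lemma pvFibs_get (k j : ℕ) (hj : j < k) : (pvFibs k)[j]'(by simp [pvFibs_length]; omega) = ((Nat.fib (j + 1) : ℕ) : Int) := by
  simp [pvFibs]

-- fibo[-1] and fibo[-2] on pvFibs j
lemma pvFibs_last (j : ℕ) (hj : 2 ≤ j) :
    (PySem.List.pyGet? (pvFibs j) (-1)).getD 0 = ((Nat.fib j : ℕ) : Int) := by
  rw [PySem.List.pyGet?_neg_ofNat (pvFibs j) 1 (by omega) (by simp [pvFibs_length]; omega)]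
  rw [List.getElem?_eq_getElem (by simp [pvFibs_length]; omega)]
  have := pvFibs_get j (j - 1) (by omega)
  simp only [pvFibs_length]
  rw [show (pvFibs j)[j-1]'(by simp [pvFibs_length]; omega) = ((Nat.fib (j - 1 + 1) : ℕ) : Int) from pvFibs_get j (j-1) (by omega)]
  simp
  congr 1
  omega

lemma pvFibs_last2 (j : ℕ) (hj : 2 ≤ j) :
    (PySem.List.pyGet? (pvFibs j) (-2)).getD 0 = ((Nat.fib (j - 1) : ℕ) : Int) := by
  rw [PySem.List.pyGet?_neg_ofNat (pvFibs j) 2 (by omega) (by simp [pvFibs_length]; omega)]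
  rw [List.getElem?_eq_getElem (by simp [pvFibs_length]; omega)]
  simp only [pvFibs_length]
  rw [show (pvFibs j)[j-2]'(by simp [pvFibs_length]; omega) = ((Nat.fib (j - 2 + 1) : ℕ) : Int) from pvFibs_get j (j-2) (by omega)]
  simp
  congr 1
  omega

-- growth: j ≤ fib (j+1)
lemma pvFib_ge (j : ℕ) : j ≤ Nat.fib (j + 1) ∧ j + 1 ≤ Nat.fib (j + 2) := by
  induction j with
  | zero => decide
  | succ j ih =>
      refine ⟨ih.2, ?_⟩
      have := ih.1
      have h2 := ih.2
      have hp := Nat.fib_pos.mpr (show 0 < j + 1 by omega)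
      rw [Nat.fib_add_two]
      simp only [show j + 1 + 1 = j + 2 from rfl] at *
      omega

-- A's build loop produces a full Fibonacci prefix whose next element exceeds n
lemma pvBuild_go (n : Int) : ∀ (fuel : List Int) (j : ℕ), 2 ≤ j →
    (n + 2 : Int) ≤ (j : Int) + fuel.length →
    ∃ K, 2 ≤ K ∧ (n : Int) < (Nat.fib (K + 1) : ℕ) ∧ pvBuildA n fuel (pvFibs j) = pvFibs K := by
  intro fuel
  induction fuel with
  | nil =>
      intro j hj hlen
      refine ⟨j, hj, ?_, rfl⟩
      have := (pvFib_ge j).1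
      simp at hlen
      omega
  | cons x rest ih =>
      intro j hj hlen
      rw [pvBuildA]
      rw [pvFibs_last j hj, pvFibs_last2 j hj]
      have hsum : ((Nat.fib j : ℕ) : Int) + ((Nat.fib (j - 1) : ℕ) : Int) = ((Nat.fib (j + 1) : ℕ) : Int) := by
        have : Nat.fib (j - 1) + Nat.fib j = Nat.fib (j + 1) := by
          have : j - 1 + 2 = j + 1 := by omega
          rw [← this, Nat.fib_add_two]
          congr 2
          omega
        push_cast [← this]
        ring
      split_ifs with h
      · exact ⟨j, hj, by omega, rfl⟩
      · rw [hsum, ← pvFibs_succ]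
        have := ih (j + 1) (by omega) (by simp at hlen ⊢; omega)
        obtain ⟨K, hK2, hKlt, hKeq⟩ := this
        exact ⟨K, hK2, hKlt, hKeq⟩

-- the ascent finds the largest Fibonacci number ≤ r
lemma pvAscend_spec_aux (r : Int) (i : ℕ) (hi : 1 ≤ i)
    (hle : ((Nat.fib i : ℕ) : Int) ≤ r) (hlt : r < ((Nat.fib (i + 1) : ℕ) : Int)) :
    ∀ (fuel j : ℕ), 1 ≤ j → j ≤ i → i - j ≤ fuel →
      pvAscend fuel r ((Nat.fib j : ℕ) : Int) ((Nat.fib (j + 1) : ℕ) : Int) = ((Nat.fib i : ℕ) : Int) := by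
  intro fuel
  induction fuel with
  | zero =>
      intro j hj1 hji hd
      have hji' : j = i := by omega
      subst hji'
      rfl
  | succ fuel ihf =>
      intro j hj1 hji hd
      rw [pvAscend]
      split_ifs with h
      · have hjlt : j < i := by
          by_contra hc
          have : j = i := by omega
          subst this
          omega
        have hfib2 : ((Nat.fib j : ℕ) : Int) + ((Nat.fib (j + 1) : ℕ) : Int) = ((Nat.fib (j + 2) : ℕ) : Int) := by
          rw [Nat.fib_add_two]
          push_cast
          ring
        rw [hfib2]
        exact ihf (j + 1) (by omega) (by omega) (by omega)
      · have hji' : j = i := by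
          by_contra hc
          have hjlt : j + 1 ≤ i := by omega
          have : Nat.fib (j + 1) ≤ Nat.fib i := Nat.fib_mono hjlt
          have : ((Nat.fib (j + 1) : ℕ) : Int) ≤ ((Nat.fib i : ℕ) : Int) := by exact_mod_cast this
          omega
        subst hji'
        rfl

lemma pvAscend_spec (r : Int) (i : ℕ) (hi : 1 ≤ i)
    (hle : ((Nat.fib i : ℕ) : Int) ≤ r) (hlt : r < ((Nat.fib (i + 1) : ℕ) : Int)) :
    pvAscend (r + 1).toNat r 1 1 = ((Nat.fib i : ℕ) : Int) := by
  have hgrow := (pvFib_ge (i - 1)).1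
  have hi1 : i - 1 + 1 = i := by omega
  rw [hi1] at hgrow
  have hfuel : i - 1 ≤ (r + 1).toNat := by
    have : ((i - 1 : ℕ) : Int) ≤ ((Nat.fib i : ℕ) : Int) := by exact_mod_cast hgrow
    omega
  have := pvAscend_spec_aux r i hi hle hlt (r + 1).toNat 1 (by omega) hi (by omega)
  have h1 : ((Nat.fib 1 : ℕ) : Int) = 1 := by decide
  have h2 : ((Nat.fib (1 + 1) : ℕ) : Int) = 1 := by decide
  rw [h1, h2] at this
  exact this

lemma pvOuter_stop (r c : Int) (h : ¬ 0 < r) : pvOuter r c = c := by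
  rw [pvOuter.eq_def, dif_neg h]

lemma pvOuter_step (r c : Int) (h : 0 < r) :
    pvOuter r c = pvOuter (r - pvAscend (r + 1).toNat r 1 1) (c + 1) := by
  rw [pvOuter.eq_def, dif_pos h]

-- shifting the outer counter
lemma pvOuter_shift_aux : ∀ (m : ℕ) (r : Int), r.toNat ≤ m → ∀ c, pvOuter r c = c + pvOuter r 0 := by
  intro m
  induction m with
  | zero =>
      intro r hr c
      rw [pvOuter_stop r c (by omega), pvOuter_stop r 0 (by omega)]
      omega
  | succ m ihm =>
      intro r hr c
      by_cases h : 0 < r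
      · have hpos := pvAscend_pos (r + 1).toNat r 1 1 (by omega) (by omega)
        rw [pvOuter_step r c h, pvOuter_step r 0 h]
        rw [ihm _ (by omega) (c + 1), ihm _ (by omega) (0 + 1)]
        omega
      · rw [pvOuter_stop r c h, pvOuter_stop r 0 h]
        omega

lemma pvOuter_shift (r c : Int) : pvOuter r c = c + pvOuter r 0 :=
  pvOuter_shift_aux r.toNat r le_rfl c

-- A's greedy pass over a reversed complete Fibonacci prefix computes B's count
lemma pvGreedy_spec (n : Int) : ∀ (i : ℕ) (c t : Int),
    1 ≤ n - c → n - c < ((Nat.fib (i + 1) : ℕ) : Int) →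
    pvGreedyA n ((pvFibs i).reverse) c t = some (t + pvOuter (n - c) 0) := by
  intro i
  induction i with
  | zero =>
      intro c t h1 h2
      rw [show ((Nat.fib (0 + 1) : ℕ) : Int) = 1 from rfl] at h2
      omega
  | succ i ih =>
      intro c t h1 h2
      rw [show ((Nat.fib (i + 1 + 1) : ℕ) : Int) = ((Nat.fib (i + 2) : ℕ) : Int) from rfl] at h2
      set r := n - c with hr
      set x : Int := ((Nat.fib (i + 1) : ℕ) : Int) with hx
      have hxpos : 1 ≤ x := by
        have h := Nat.fib_pos.mpr (show 0 < i + 1 by omega)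
        rw [hx]
        exact_mod_cast h
      have hmono : ((Nat.fib i : ℕ) : Int) ≤ x := by
        rw [hx]
        exact_mod_cast Nat.fib_mono (show i ≤ i + 1 by omega)
      have hfib2 : ((Nat.fib (i + 2) : ℕ) : Int) = ((Nat.fib i : ℕ) : Int) + x := by
        rw [Nat.fib_add_two]; push_cast; ring
      have hrev : (pvFibs (i + 1)).reverse = x :: (pvFibs i).reverse := by
        rw [pvFibs_succ]; simp [hx]
      rw [hrev, pvGreedyA]
      have hspec : ((Nat.fib (i + 1) : ℕ) : Int) ≤ r → pvAscend (r + 1).toNat r 1 1 = x := fun hle =>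
        pvAscend_spec r (i + 1) (by omega) hle (by rw [show i + 1 + 1 = i + 2 from rfl]; exact h2)
      rcases lt_trichotomy (c + x) n with hlt | heq | hgt
      · -- take x
        have hr2x : r < 2 * x := by
          rw [hfib2] at h2
          omega
        rw [if_pos (show c + x < n from hlt), if_pos (show c + x < n from hlt),
            if_neg (show ¬(c + x + x = n) from by omega)]
        rw [ih (c + x) (t + 1) (by omega) (by rw [hfib2] at h2; omega)]
        have hasc : pvAscend (r + 1).toNat r 1 1 = x := hspec (by rw [← hx]; omega)
        have hone : pvOuter r 0 = 1 + pvOuter (r - x) 0 := by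
          rw [pvOuter_step r 0 (by omega), hasc, pvOuter_shift (r - x) (0 + 1)]
          omega
        rw [show n - (c + x) = r - x from by omega, hone]
        congr 1
        omega
      · -- x = r: return total + 1
        rw [if_neg (show ¬(c + x < n) from by omega), if_neg (show ¬(c + x < n) from by omega),
            if_pos (show c + x = n from heq)]
        have hasc : pvAscend (r + 1).toNat r 1 1 = x := hspec (by rw [← hx]; omega)
        have hone : pvOuter r 0 = 1 := by
          rw [pvOuter_step r 0 (by omega), hasc, show r - x = 0 from by omega,
              pvOuter_stop 0 (0 + 1) (by omega)]
          omega
        rw [hone]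
      · -- skip x
        rw [if_neg (show ¬(c + x < n) from by omega), if_neg (show ¬(c + x < n) from by omega),
            if_neg (show ¬(c + x = n) from by omega)]
        exact ih c t h1 (by omega)

-- the n ≤ 0 case of A evaluates to none
lemma pvA_nonpos (n : Int) (hn : n ≤ 0) : fibonacci_subset_sum n = none := by
  show pvGreedyA n ((PySem.List.slice? (pvBuildA n (PySem.List.pyRange 0 n 1) [1, 1]) none none (-1)).getD []) 0 0 = none
  rw [PySem.List.pyRange_one_eq_nil (by omega)]
  rw [show pvBuildA n [] [1, 1] = [1, 1] from rfl]
  rw [PySem.List.slice?_none_none_neg_one]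
  show pvGreedyA n [1, 1] 0 0 = none
  rw [pvGreedyA, if_neg (by omega), if_neg (by omega)]
  rw [pvGreedyA, if_neg (by omega), if_neg (by omega)]
  rfl

-- ===== VERDICT (by name: the statement is the Claim_ definition above) =====
theorem fibonacci_subset_sum_spec : Claim_equal_fibonacci_subset_sum := by
  intro n _
  show fibonacci_subset_sum n = fibonacci_subset_sum_alt n
  by_cases hn : n ≤ 0
  · rw [pvA_nonpos n hn]
    unfold fibonacci_subset_sum_alt
    rw [if_pos hn]
  · rw [not_le] at hn
    show pvGreedyA n ((PySem.List.slice? (pvBuildA n (PySem.List.pyRange 0 n 1) [1, 1]) none none (-1)).getD []) 0 0 = fibonacci_subset_sum_alt n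
    have hbuild := pvBuild_go n (PySem.List.pyRange 0 n 1) 2 (by omega)
      (by rw [PySem.List.length_pyRange_one]; push_cast; omega)
    obtain ⟨K, hK2, hKlt, hKeq⟩ := hbuild
    rw [← pvFibs_two, hKeq]
    rw [PySem.List.slice?_none_none_neg_one]
    show pvGreedyA n ((pvFibs K).reverse) 0 0 = fibonacci_subset_sum_alt n
    rw [pvGreedy_spec n K 0 0 (by omega) (by simpa using hKlt)]
    unfold fibonacci_subset_sum_alt
    rw [if_neg (by omega)]
    norm_num
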